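-- pv_equiv track=rewrite | github.com/wensincai/transwarp-nlp | transwarpnlp/pos/dataset/rawdata.py | _split_word_tag
-- ===== SOURCE A (Python) =====
-- def _split_word_tag(data):
--     word = []
--     tag = []
--     for word_tag_pair in data:
--         pairs = word_tag_pair.split("/")
--         if (len(pairs)==2):
--             # word or tag not equal to ""
--             if (len(pairs[0].strip())!=0 and len(pairs[1].strip())!=0):
--                 word.append(pairs[0])
--                 tag.append(pairs[1])
--     return word, tag
-- ===== SOURCE B (Python) =====
-- def _split_word_tag(data):
--     # Column-wise extraction: instead of splitting into a list and appending to two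
--     # lists at once, test "exactly one '/'" via count and cut the string with
--     # partition; each output column is produced by its own pass.
--     def column(select):
--         col = []
--         for s in data:
--             if s.count("/") == 1:
--                 head, _, tail = s.partition("/")
--                 if head.strip() and tail.strip():
--                     col.append(select(head, tail))
--         return col
--     return column(lambda head, tail: head), column(lambda head, tail: tail)
-- ===== Notes on version B (the rewrite author's own statement) =====
-- stated objective: alternative
-- what changed: A splits each element into a list and appends word and tag to two lists inside one loop; B never builds a split list: it tests validity with s.count('/') == 1, cuts the string with s.partition('/'), and produces each output column by its own independent pass (loop fission).
import Mathlib
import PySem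

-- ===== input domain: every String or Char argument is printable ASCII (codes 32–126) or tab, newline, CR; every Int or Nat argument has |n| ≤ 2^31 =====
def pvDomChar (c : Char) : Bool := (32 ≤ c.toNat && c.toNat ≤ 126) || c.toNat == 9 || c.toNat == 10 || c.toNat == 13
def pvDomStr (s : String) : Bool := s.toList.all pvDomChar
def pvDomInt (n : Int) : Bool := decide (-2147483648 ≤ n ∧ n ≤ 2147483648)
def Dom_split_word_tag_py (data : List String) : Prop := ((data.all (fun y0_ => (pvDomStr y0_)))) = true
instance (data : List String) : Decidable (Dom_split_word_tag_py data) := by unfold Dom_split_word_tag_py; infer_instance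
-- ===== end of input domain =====

-- B replaces A's split-into-a-list + dual-append loop by a count/partition validity test
-- and two independent column passes (loop fission); objective: alternative, same cost.

-- ===== PORT A =====
-- s.split("/"): the separator is the non-empty literal "/", so PySem.Str.split? is always `some`; getD [] only strips the option.
def split_word_tag_py (data : List String) : List String × List String :=
  data.foldl (fun (st : List String × List String) word_tag_pair =>
    let pairs := (PySem.Str.split? word_tag_pair "/").getD []
    if pairs.length == 2 then
      if (PySem.Str.len (PySem.Str.strip (pairs.getD 0 "")) != 0) &&
         (PySem.Str.len (PySem.Str.strip (pairs.getD 1 "")) != 0) then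
        (st.1 ++ [pairs.getD 0 ""], st.2 ++ [pairs.getD 1 ""])
      else st
    else st) ([], [])

-- ===== PORT B =====
-- str.partition for a one-character separator, ported by hand as the scan for the first
-- occurrence; exact for the single-char separator Source B uses (absent separator gives (s, "", "")).
def pyPartition1 (sep : Char) : List Char → List Char × List Char × List Char
  | [] => ([], [], [])
  | c :: r =>
    if c = sep then ([], [sep], r)
    else
      let p := pyPartition1 sep r
      (c :: p.1, p.2.1, p.2.2)

-- Source B's inner helper `column(select)`: one pass over data collecting select(head, tail)
-- of the elements with exactly one '/' whose two stripped sides are non-empty.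
def pvColumn (data : List String) (select : List Char → List Char → String) : List String :=
  data.foldl (fun col s =>
    if PySem.Str.count s "/" == 1 then
      let p := pyPartition1 '/' s.toList
      if ((PySem.Chars.strip p.1).length != 0) && ((PySem.Chars.strip p.2.2).length != 0) then
        col ++ [select p.1 p.2.2]
      else col
    else col) []

def split_word_tag_py_alt (data : List String) : List String × List String :=
  (pvColumn data (fun head _ => String.ofList head),
   pvColumn data (fun _ tail => String.ofList tail))

-- ===== PRECONDITION & SPEC =====
def Spec_split_word_tag_py (data : List String) (out : List String × List String) : Prop := out = split_word_tag_py_alt data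
instance (data : List String) (out : List String × List String) : Decidable (Spec_split_word_tag_py data out) := by unfold Spec_split_word_tag_py; infer_instance

-- ===== CLAIM =====
def Claim_equal_split_word_tag_py : Prop := ∀ (data : List String), Dom_split_word_tag_py data → Spec_split_word_tag_py data (split_word_tag_py data)

-- ===== LEMMAS AND PROOFS =====

-- proof-only helpers: the two column loop-steps of pvColumn with its select instantiated
def pvStepW (col : List String) (s : String) : List String :=
  if PySem.Str.count s "/" == 1 then
    let p := pyPartition1 '/' s.toList
    if ((PySem.Chars.strip p.1).length != 0) && ((PySem.Chars.strip p.2.2).length != 0) then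
      col ++ [String.ofList p.1]
    else col
  else col

def pvStepT (col : List String) (s : String) : List String :=
  if PySem.Str.count s "/" == 1 then
    let p := pyPartition1 '/' s.toList
    if ((PySem.Chars.strip p.1).length != 0) && ((PySem.Chars.strip p.2.2).length != 0) then
      col ++ [String.ofList p.2.2]
    else col
  else col

-- the pieces s.split("/") produces, written structurally (pre = the piece being built)
def pvPieces (pre : List Char) : List Char → List (List Char)
  | [] => [pre]
  | c :: r => if c = '/' then pre :: pvPieces [] r else pvPieces (pre ++ [c]) r

lemma pvSplitOn_go_eq : ∀ (l : List Char) (fuel : Nat) (cur : List Char) (acc : List (List Char)),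
    l.length < fuel →
    PySem.Chars.splitOn.go ['/'] fuel l cur acc = acc.reverse ++ pvPieces cur.reverse l := by
  intro l
  induction l with
  | nil =>
    intro fuel cur acc h
    cases fuel with
    | zero => omega
    | succ f => rw [PySem.Chars.splitOn.go.eq_def]; simp [pvPieces]
  | cons c r ih =>
    intro fuel cur acc h
    cases fuel with
    | zero => omega
    | succ f =>
      rw [PySem.Chars.splitOn.go.eq_def]
      by_cases hc : c = '/'
      · subst hc
        simp only [List.isPrefixOf, BEq.rfl, Bool.true_and, if_true]
        rw [show List.drop (['/'] : List Char).length ('/' :: r) = r from rfl,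
          ih f [] (cur.reverse :: acc) (by simpa using Nat.lt_of_succ_lt_succ h)]
        simp [pvPieces]
      · have : (['/'].isPrefixOf (c :: r)) = false := by
          simp [List.isPrefixOf]; exact fun hw => absurd hw.symm hc
        simp only [this]
        rw [ih f (c :: cur) acc (by simpa using Nat.lt_of_succ_lt_succ h)]
        simp [pvPieces, hc]

lemma pvSplitOn_slash (s : List Char) : PySem.Chars.splitOn s ['/'] = pvPieces [] s := by
  unfold PySem.Chars.splitOn
  rw [pvSplitOn_go_eq s (s.length + 1) [] [] (by omega)]
  simp

lemma pvCount_go_eq : ∀ (l : List Char) (fuel : Nat) (acc : Nat),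
    l.length ≤ fuel →
    PySem.Chars.count.go ['/'] fuel l acc = acc + l.count '/' := by
  intro l
  induction l with
  | nil =>
    intro fuel acc h
    cases fuel with
    | zero => rw [PySem.Chars.count.go.eq_def]; simp
    | succ f => rw [PySem.Chars.count.go.eq_def]; simp
  | cons c r ih =>
    intro fuel acc h
    cases fuel with
    | zero => simp at h
    | succ f =>
      rw [PySem.Chars.count.go.eq_def]
      by_cases hc : c = '/'
      · subst hc
        simp only [List.isPrefixOf, BEq.rfl, Bool.true_and, if_true]
        rw [show List.drop (['/'] : List Char).length ('/' :: r) = r from rfl,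
          ih f (acc + 1) (by simpa using Nat.le_of_succ_le_succ h)]
        simp
        omega
      · have : (['/'].isPrefixOf (c :: r)) = false := by
          simp [List.isPrefixOf]; exact fun hw => absurd hw.symm hc
        simp only [this]
        rw [ih f acc (by simpa using Nat.le_of_succ_le_succ h)]
        simp [List.count_cons]
        intro hw; exact absurd hw hc

lemma pvCount_slash (s : List Char) : PySem.Chars.count s ['/'] = s.count '/' := by
  unfold PySem.Chars.count
  rw [if_neg (by simp)]
  rw [pvCount_go_eq s s.length 0 (le_refl _)]
  simp

lemma pvPieces_length (l : List Char) : ∀ pre, (pvPieces pre l).length = l.count '/' + 1 := by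
  induction l with
  | nil => intro pre; simp [pvPieces]
  | cons c r ih =>
    intro pre
    by_cases hc : c = '/'
    · subst hc; simp [pvPieces, ih]
    · simp [pvPieces, hc, ih]

lemma pvPieces_count_zero (l : List Char) : ∀ pre, l.count '/' = 0 → pvPieces pre l = [pre ++ l] := by
  induction l with
  | nil => intro pre _; simp [pvPieces]
  | cons c r ih =>
    intro pre h
    by_cases hc : c = '/'
    · subst hc; simp at h
    · rw [List.count_cons] at h
      simp [pvPieces, hc, ih (pre ++ [c]) (by omega)]

lemma pvPieces_count_one (l : List Char) : ∀ pre, l.count '/' = 1 →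
    pvPieces pre l = [pre ++ (pyPartition1 '/' l).1, (pyPartition1 '/' l).2.2] := by
  induction l with
  | nil => intro pre h; simp at h
  | cons c r ih =>
    intro pre h
    by_cases hc : c = '/'
    · subst hc
      rw [List.count_cons] at h
      simp only [BEq.rfl, if_true] at h
      have hr : r.count '/' = 0 := by omega
      simp [pvPieces, pyPartition1, pvPieces_count_zero r [] hr]
    · rw [List.count_cons] at h
      simp only [hc, beq_iff_eq] at h
      have h1 : r.count '/' = 1 := by
        by_cases hw : ('/' : Char) = c
        · exact absurd hw.symm hc
        · simpa [hw] using h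
      simp [pvPieces, pyPartition1, hc, ih (pre ++ [c]) h1]

lemma pvLenStrip (l : List Char) :
    (PySem.Str.len (PySem.Str.strip (String.ofList l)) != 0) = ((PySem.Chars.strip l).length != 0) := by
  simp [PySem.Str.len, PySem.Str.strip, bne]

-- A's loop body equals the pair of B's two column steps, pointwise
lemma pvStep_pointwise (st : List String × List String) (s : String) :
    (let pairs := (PySem.Str.split? s "/").getD []
     if pairs.length == 2 then
       if (PySem.Str.len (PySem.Str.strip (pairs.getD 0 "")) != 0) &&
          (PySem.Str.len (PySem.Str.strip (pairs.getD 1 "")) != 0) then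
         (st.1 ++ [pairs.getD 0 ""], st.2 ++ [pairs.getD 1 ""])
       else st
     else st)
    = (pvStepW st.1 s, pvStepT st.2 s) := by
  have hsplit : (PySem.Str.split? s "/").getD [] = (pvPieces [] s.toList).map String.ofList := by
    have h2 : ("/" : String).toList = ['/'] := by decide
    simp [PySem.Str.split?, PySem.Chars.split?, h2, pvSplitOn_slash]
  have hcount : PySem.Str.count s "/" = s.toList.count '/' := by
    have h2 : ("/" : String).toList = ['/'] := by decide
    rw [PySem.Str.count_eq, h2, pvCount_slash]
  simp only [hsplit]
  unfold pvStepW pvStepT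
  simp only [hcount]
  by_cases h1 : s.toList.count '/' = 1
  · rw [pvPieces_count_one s.toList [] h1]
    simp only [h1, List.nil_append, List.map_cons, List.map_nil, List.length_cons,
      List.length_nil, List.getD, List.getElem?_cons_zero, List.getElem?_cons_succ,
      Option.getD_some, beq_self_eq_true, if_true, pvLenStrip]
    split_ifs with hcond
    · rfl
    · rfl
  · have h2 : (pvPieces [] s.toList).length ≠ 2 := by rw [pvPieces_length]; omega
    have hA : (((pvPieces [] s.toList).map String.ofList).length == 2) = false := by
      simp [h2]
    have hB : (s.toList.count '/' == 1) = false := by simp [h1]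
    simp [hB]
    exact fun hl _ _ => absurd hl h2

-- ===== VERDICT =====
theorem split_word_tag_py_spec : Claim_equal_split_word_tag_py := by
  intro data _
  unfold Spec_split_word_tag_py split_word_tag_py split_word_tag_py_alt pvColumn
  have h : (fun (st : List String × List String) word_tag_pair =>
        let pairs := (PySem.Str.split? word_tag_pair "/").getD []
        if pairs.length == 2 then
          if (PySem.Str.len (PySem.Str.strip (pairs.getD 0 "")) != 0) &&
             (PySem.Str.len (PySem.Str.strip (pairs.getD 1 "")) != 0) then
            (st.1 ++ [pairs.getD 0 ""], st.2 ++ [pairs.getD 1 ""])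
          else st
        else st)
      = fun (st : List String × List String) s => (pvStepW st.1 s, pvStepT st.2 s) := by
    funext st s; exact pvStep_pointwise st s
  rw [h, PySem.List.foldl_prod_mk]
  rfl
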